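-- pv_equiv track=rewrite | github.com/BarreiroCollege/USI-NTW-A1 | utils/vhosts.py | is_secure_path
-- ===== SOURCE A (Python) =====
-- def is_secure_path(path: str) -> bool:
--     """
--     Given a path, check if it is secure, i.e. does not go outside the virtual host filesystem
--     :param path: path to be checked
--     :return: True if path never leaves host folder
--     """
--
--     parts = path.split("/")
--     level = 0
--     for part in parts:
--         # If an empty path is found (//) or a dot (/./), it means no change
--         if part == '' or part == '.':
--             continue
--         # If "previous" path is found (/../), we substract one to the level
--         elif part == '..':
--             level -= 1
--         # Otherwise, we increase by one the subfolder level
--         else: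
--             level += 1
--
--         # If we ever go outside this folder, return False
--         if level < 0:
--             return False
--     # If we never left filesystem root folder, it is safe
--     return True
-- ===== SOURCE B (Python) =====
-- def _reduce(parts):
--     # cancel the first "folder/.." pair; '..' at the front means escape
--     try:
--         i = parts.index('..')
--     except ValueError:
--         return True
--     if i == 0:
--         return False
--     return _reduce(parts[:i-1] + parts[i+1:])
--
--
-- def is_secure_path(path: str) -> bool:
--     return _reduce([p for p in path.split('/') if p not in ('', '.')])
-- ===== Notes on version B (the rewrite author's own statement) =====
-- stated objective: alternative
-- what changed: Replaces the single-pass depth counter with a rewrite system: after filtering '' and '.', it repeatedly locates the first '..' and cancels it with the preceding folder name, recursing on the shortened list; the path is insecure exactly when a '..' surfaces at the front.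
import Mathlib
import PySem

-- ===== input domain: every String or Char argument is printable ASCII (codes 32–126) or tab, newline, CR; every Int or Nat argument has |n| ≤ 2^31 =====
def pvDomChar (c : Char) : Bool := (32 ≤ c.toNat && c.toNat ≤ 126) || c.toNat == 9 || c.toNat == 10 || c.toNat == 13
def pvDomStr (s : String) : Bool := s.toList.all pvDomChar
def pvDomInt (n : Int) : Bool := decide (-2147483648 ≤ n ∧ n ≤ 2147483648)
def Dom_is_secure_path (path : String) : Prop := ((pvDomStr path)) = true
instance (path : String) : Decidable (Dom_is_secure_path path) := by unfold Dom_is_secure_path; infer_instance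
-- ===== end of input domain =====

-- B replaces A's single-pass depth counter with a cancellation rewrite system (alternative algorithm, return value only).

-- ===== PORT A =====
-- A's loop: integer level; '' and '.' skip, '..' decrements, others increment; early False when level < 0.
def pvLoopA : List String → Int → Bool
  | [], _ => true
  | part :: rest, level =>
    if part = "" ∨ part = "." then pvLoopA rest level
    else
      let level' := if part = ".." then level - 1 else level + 1
      if level' < 0 then false else pvLoopA rest level'

def is_secure_path (path : String) : Bool :=
  pvLoopA (((PySem.Str.split? path "/").getD [])) 0

-- ===== PORT B =====
-- B: filter out '' and '.', then repeatedly cancel the first ".." with the folder before it;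
-- a ".." surfacing at the front means the path escapes.
def pvReduce (parts : List String) : Bool :=
  match h : PySem.List.index? parts ".." with
  | none => true
  | some i =>
    if hi : i = 0 then false
    else
      pvReduce (PySem.List.slice parts none (some ((i : Int) - 1)) ++
                PySem.List.slice parts (some ((i : Int) + 1)) none)
termination_by parts.length
decreasing_by
  have hk := PySem.List.getElem_of_index?_eq_some h
  obtain ⟨hlt, -, -⟩ := hk
  have h1 : ((i : Int) - 1) = ((i - 1 : Nat) : Int) := by omega
  have h2 : ((i : Int) + 1) = ((i + 1 : Nat) : Int) := by omega
  rw [h1, h2, PySem.List.slice_to_natCast, PySem.List.slice_from_natCast]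
  simp only [List.length_append, List.length_take, List.length_drop]
  omega

def is_secure_path_alt (path : String) : Bool :=
  pvReduce ((((PySem.Str.split? path "/").getD [])).filter (fun p => !(p == "" || p == ".")))

-- ===== PRECONDITION & SPEC =====
def Spec_is_secure_path (path : String) (out : Bool) : Prop := out = is_secure_path_alt path
instance (path : String) (out : Bool) : Decidable (Spec_is_secure_path path out) := by unfold Spec_is_secure_path; infer_instance

-- ===== CLAIM (what is proved, stated in full; the proofs are below) =====
def Claim_equal_is_secure_path : Prop := ∀ (path : String), Dom_is_secure_path path → Spec_is_secure_path path (is_secure_path path)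

-- ===== LEMMAS AND PROOFS =====

-- equation lemmas for the well-founded pvReduce
theorem pvReduce_none (parts : List String) (h : PySem.List.index? parts ".." = none) :
    pvReduce parts = true := by
  rw [pvReduce]; split
  · rfl
  · rename_i i h'; rw [h'] at h; cases h

theorem pvReduce_some (parts : List String) (i : Nat)
    (h : PySem.List.index? parts ".." = some i) :
    pvReduce parts = if i = 0 then false
      else pvReduce (PySem.List.slice parts none (some ((i : Int) - 1)) ++
                     PySem.List.slice parts (some ((i : Int) + 1)) none) := by
  rw [pvReduce]; split
  · rename_i h'; rw [h'] at h; cases h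
  · rename_i j h'; rw [h'] at h; injection h with h; subst h
    by_cases hi : j = 0
    · simp [hi]
    · rw [dif_neg hi, if_neg hi]

-- A's loop ignores the skipped parts, so it only sees the filtered list.
theorem pvLoopA_filter (parts : List String) : ∀ (l : Int),
    pvLoopA parts l = pvLoopA (parts.filter (fun p => !(p == "" || p == "."))) l := by
  induction parts with
  | nil => intro l; rfl
  | cons part rest ih =>
    intro l
    by_cases hskip : part = "" ∨ part = "."
    · have hc : ¬(¬part = "" ∧ ¬part = ".") := by tauto
      simp [pvLoopA, hskip, hc, ih]
    · have hc : (¬part = "" ∧ ¬part = ".") := by tauto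
      simp only [List.filter_cons]
      simp only [pvLoopA, if_neg hskip]
      simp [hc, pvLoopA, ih]

-- without ".." and from a nonnegative level, A's loop always succeeds
theorem pvLoopA_noDD (parts : List String) : ∀ (l : Int), ".." ∉ parts → 0 ≤ l →
    pvLoopA parts l = true := by
  induction parts with
  | nil => intro l _ _; rfl
  | cons part rest ih =>
    intro l hmem hl
    have hdd : part ≠ ".." := by intro h; exact hmem (h ▸ List.mem_cons_self ..)
    have hrest : ".." ∉ rest := fun h => hmem (List.mem_cons_of_mem _ h)
    by_cases hskip : part = "" ∨ part = "."
    · simp [pvLoopA, hskip, ih _ hrest hl]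
    · have h1 : ¬ (l + 1 < 0) := by omega
      simp only [pvLoopA, if_neg hskip, if_neg hdd]
      rw [if_neg h1]
      exact ih _ hrest (by omega)

-- a prefix of plain folder names just raises the level by its length
theorem pvLoopA_prefix (pre : List String) : ∀ (rest : List String) (l : Int),
    (∀ p ∈ pre, ¬(p = "" ∨ p = ".") ∧ p ≠ "..") → 0 ≤ l →
    pvLoopA (pre ++ rest) l = pvLoopA rest (l + pre.length) := by
  induction pre with
  | nil => intro rest l _ _; simp
  | cons p pre' ih =>
    intro rest l hp hl
    have hph := hp p (List.mem_cons_self ..)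
    have hrest : ∀ q ∈ pre', ¬(q = "" ∨ q = ".") ∧ q ≠ ".." :=
      fun q hq => hp q (List.mem_cons_of_mem _ hq)
    simp only [List.cons_append, pvLoopA, if_neg hph.1, if_neg hph.2]
    rw [if_neg (by omega : ¬ l + 1 < 0), ih rest (l + 1) hrest (by omega)]
    congr 1
    simp; omega

-- main invariant: on filtered lists A's counter loop agrees with B's cancellation
theorem pvLoopA_eq_pvReduce : ∀ (n : ℕ) (parts : List String), parts.length ≤ n →
    (∀ p ∈ parts, ¬(p = "" ∨ p = ".")) →
    pvLoopA parts 0 = pvReduce parts := by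
  intro n
  induction n with
  | zero =>
    intro parts hlen _
    have hnil : parts = [] := List.eq_nil_of_length_eq_zero (by omega)
    subst hnil
    rw [pvReduce_none _ (by rw [PySem.List.index?_eq_none_iff]; simp)]
    rfl
  | succ n ih =>
    intro parts hlen hmem
    cases h : PySem.List.index? parts ".." with
    | none =>
      have hnot : ".." ∉ parts := (PySem.List.index?_eq_none_iff ..).mp h
      rw [pvReduce_none _ h]
      exact pvLoopA_noDD parts 0 hnot le_rfl
    | some i =>
      obtain ⟨pre, suf, hsplit, hlenpre, hpre⟩ := (PySem.List.index?_eq_some_iff ..).mp h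
      by_cases hi : i = 0
      · subst hi
        have hnil : pre = [] := List.eq_nil_of_length_eq_zero hlenpre
        subst hnil
        simp only [List.nil_append] at hsplit
        subst hsplit
        rw [pvReduce_some _ 0 h, if_pos rfl]
        simp [pvLoopA]
      · have hprecond : ∀ p ∈ pre, ¬(p = "" ∨ p = ".") ∧ p ≠ ".." := by
          intro p hp
          refine ⟨hmem p (hsplit ▸ List.mem_append_left _ hp), ?_⟩
          intro hp'; exact hpre (hp' ▸ hp)
        have hns : ¬((".." : String) = "" ∨ (".." : String) = ".") := by decide
        -- left side: run through pre, then consume the ".."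
        have hL : pvLoopA parts 0 = pvLoopA suf ((i : Int) - 1) := by
          rw [hsplit, pvLoopA_prefix pre _ 0 hprecond le_rfl]
          simp only [pvLoopA, if_neg hns, if_true]
          rw [hlenpre]
          rw [if_neg (by omega : ¬ (0 : Int) + (i : ℕ) - 1 < 0)]
          congr 1; omega
        -- the reduced list is (pre minus its last element) ++ suf
        have h1 : ((i : Int) - 1) = ((i - 1 : Nat) : Int) := by omega
        have h2 : ((i : Int) + 1) = ((i + 1 : Nat) : Int) := by omega
        have hred : PySem.List.slice parts none (some ((i : Int) - 1)) ++
                    PySem.List.slice parts (some ((i : Int) + 1)) none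
                    = pre.take (i - 1) ++ suf := by
          rw [h1, h2, PySem.List.slice_to_natCast, PySem.List.slice_from_natCast, hsplit]
          congr 1
          · rw [List.take_append_of_le_length (by omega)]
          · rw [List.drop_append]
            have ha : pre.drop (i + 1) = [] := List.drop_eq_nil_of_le (by omega)
            have hb : i + 1 - pre.length = 1 := by omega
            rw [ha, hb]; rfl
        have htakecond : ∀ p ∈ pre.take (i - 1), ¬(p = "" ∨ p = ".") ∧ p ≠ ".." :=
          fun p hp => hprecond p (List.mem_of_mem_take hp)
        have hR : pvLoopA (pre.take (i - 1) ++ suf) 0 = pvLoopA suf ((i : Int) - 1) := by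
          rw [pvLoopA_prefix _ _ 0 htakecond le_rfl]
          congr 1
          have h4 : (pre.take (i - 1)).length = i - 1 := by
            rw [List.length_take]; omega
          rw [h4]; omega
        have hmem' : ∀ p ∈ pre.take (i - 1) ++ suf, ¬(p = "" ∨ p = ".") := by
          intro p hp
          rcases List.mem_append.mp hp with hp | hp
          · exact (htakecond p hp).1
          · exact hmem p (hsplit ▸ List.mem_append_right _ (List.mem_cons_of_mem _ hp))
        have hlen' : (pre.take (i - 1) ++ suf).length ≤ n := by
          have h5 : parts.length = pre.length + suf.length + 1 := by
            rw [hsplit]; simp; omega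
          simp only [List.length_append, List.length_take]
          omega
        calc pvLoopA parts 0 = pvLoopA suf ((i : Int) - 1) := hL
          _ = pvLoopA (pre.take (i - 1) ++ suf) 0 := hR.symm
          _ = pvReduce (pre.take (i - 1) ++ suf) := ih _ hlen' hmem'
          _ = pvReduce parts := by rw [pvReduce_some parts i h, if_neg hi, hred]

-- ===== VERDICT (by name: the statement is the Claim_ definition above) =====
theorem is_secure_path_spec : Claim_equal_is_secure_path := by
  intro path _
  unfold Spec_is_secure_path is_secure_path is_secure_path_alt
  rw [pvLoopA_filter]
  apply pvLoopA_eq_pvReduce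
    ((((PySem.Str.split? path "/").getD []).filter (fun p => !(p == "" || p == "."))).length) _ le_rfl
  intro p hpmem
  have hcond := (List.mem_filter.mp hpmem).2
  simp at hcond
  tauto
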